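-- pv_equiv track=rewrite | github.com/kparkerNRO/fs-organizer | organizer/grouping/legacy_group.py | get_max_common_string
-- ===== SOURCE A (Python) =====
-- def get_max_common_string(tokens, name_to_comp):
--     base_token = tokens[0]
--     working_token = base_token
--
--     # greedily add tokens until they stop matching
--     for i in range(1, len(tokens) + 1):
--         test_token = " ".join(tokens[0:i])
--         if name_to_comp.startswith(test_token):
--             working_token = test_token
--         else:
--             break
--
--     return working_token
-- ===== SOURCE B (Python) =====
-- def get_max_common_string(tokens, name_to_comp):
--     first = tokens[0]
--     if not name_to_comp.startswith(first):
--         return first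
--     pos = len(first)
--     for t in tokens[1:]:
--         piece = " " + t
--         if name_to_comp[pos:pos + len(piece)] == piece:
--             pos += len(piece)
--         else:
--             break
--     return name_to_comp[:pos]
-- ===== Notes on version B (the rewrite author's own statement) =====
-- stated objective: alternative
-- what changed: Instead of re-joining tokens[0:i] from scratch and re-running startswith on the whole joined prefix at every iteration, B makes one incremental pass, checking each new token once against the next slice of name_to_comp and tracking only the matched length.
import Mathlib
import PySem

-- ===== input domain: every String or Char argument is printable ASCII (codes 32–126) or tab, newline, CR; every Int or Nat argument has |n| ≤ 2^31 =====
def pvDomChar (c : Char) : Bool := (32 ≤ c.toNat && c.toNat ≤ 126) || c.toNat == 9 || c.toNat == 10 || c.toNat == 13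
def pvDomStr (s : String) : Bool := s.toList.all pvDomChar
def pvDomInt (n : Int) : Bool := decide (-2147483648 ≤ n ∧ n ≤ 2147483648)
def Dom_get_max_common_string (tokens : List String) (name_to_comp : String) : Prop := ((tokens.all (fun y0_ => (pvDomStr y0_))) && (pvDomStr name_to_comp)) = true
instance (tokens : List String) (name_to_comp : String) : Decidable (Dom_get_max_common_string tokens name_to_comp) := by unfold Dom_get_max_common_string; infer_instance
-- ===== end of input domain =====

-- B replaces A's per-iteration re-join of tokens[0:i] and full-prefix startswith by a single
-- incremental pass that checks each new token against the next slice of name_to_comp, keeping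
-- only the matched length (objective: alternative).

-- ===== PORT A =====
-- the for-loop with break: remaining indices, working_token accumulator
def pvALoop (tokens : List String) (name_to_comp : String) : List Int → String → String
  | [], working_token => working_token
  | i :: restIdx, working_token =>
    let test_token := PySem.Str.join " " (PySem.List.slice tokens (some 0) (some i))
    if PySem.Str.startswith name_to_comp test_token then
      pvALoop tokens name_to_comp restIdx test_token
    else working_token

def get_max_common_string (tokens : List String) (name_to_comp : String) : String :=
  -- tokens[0]: IndexError on [] is excluded by Pre_; .getD "" is unreachable inside Pre_
  let base_token := (PySem.List.pyGet? tokens 0).getD ""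
  pvALoop tokens name_to_comp (PySem.List.pyRange 1 (PySem.List.len tokens + 1) 1) base_token

-- ===== PORT B =====
-- for t in tokens[1:]: advance pos by len(" "+t) while the next slice of name_to_comp equals " "+t
def pvBLoop (name_to_comp : String) : List String → Nat → Nat
  | [], pos => pos
  | t :: rest, pos =>
    let piece : List Char := ' ' :: t.toList     -- " " + t
    if PySem.List.slice name_to_comp.toList (some (pos : Int)) (some ((pos : Int) + piece.length)) = piece
    then pvBLoop name_to_comp rest (pos + piece.length)
    else pos

def get_max_common_string_alt (tokens : List String) (name_to_comp : String) : String :=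
  let first := (PySem.List.pyGet? tokens 0).getD ""    -- tokens[0]; [] excluded by Pre_
  if !(PySem.Str.startswith name_to_comp first) then first
  else
    -- pos starts at len(first) (a Nat: Python's len is nonnegative)
    let pos := pvBLoop name_to_comp (PySem.List.slice tokens (some 1) none) first.toList.length
    PySem.Str.slice name_to_comp none (some (pos : Int))   -- name_to_comp[:pos]

-- ===== PRECONDITION & SPEC =====
-- A evaluates tokens[0]: the empty token list (IndexError) is excluded, nothing else.
def Pre_get_max_common_string (tokens : List String) (name_to_comp : String) : Prop := tokens ≠ []
instance (tokens : List String) (name_to_comp : String) : Decidable (Pre_get_max_common_string tokens name_to_comp) := by unfold Pre_get_max_common_string; infer_instance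
def pvWitness_get_max_common_string : List String × String := (["ab", "c", "x"], "ab c d")

def Spec_get_max_common_string (tokens : List String) (name_to_comp : String) (out : String) : Prop := out = get_max_common_string_alt tokens name_to_comp
instance (tokens : List String) (name_to_comp : String) (out : String) : Decidable (Spec_get_max_common_string tokens name_to_comp out) := by unfold Spec_get_max_common_string; infer_instance

-- ===== CLAIM (what is proved, stated in full; the proofs are below) =====
def Claim_equal_get_max_common_string : Prop := ∀ (tokens : List String) (name_to_comp : String), Dom_get_max_common_string tokens name_to_comp → Pre_get_max_common_string tokens name_to_comp → Spec_get_max_common_string tokens name_to_comp (get_max_common_string tokens name_to_comp)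

-- ===== LEMMAS AND PROOFS =====

-- A's loop, restructured: remaining tokens, with the matched joined prefix p carried along
def pvAS (N : List Char) : List String → List Char → List Char
  | [], p => p
  | t :: r, p =>
    if PySem.Chars.startswith N (p ++ ' ' :: t.toList) then pvAS N r (p ++ ' ' :: t.toList) else p

-- " ".join(xs ++ [y]) appends " " + y when xs ≠ []
lemma pv_join_snoc (sep : List Char) : ∀ (xs : List (List Char)) (y : List Char), xs ≠ [] →
    PySem.Chars.join sep (xs ++ [y]) = PySem.Chars.join sep xs ++ sep ++ y := by
  intro xs
  induction xs with
  | nil => intro y h; exact absurd rfl h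
  | cons x xs ih =>
    intro y _
    cases xs with
    | nil => simp [PySem.Chars.join_cons_cons, PySem.Chars.join_singleton]
    | cons z zs =>
      have := ih y (by simp)
      simp only [List.cons_append, PySem.Chars.join_cons_cons] at this ⊢
      rw [this]; simp [List.append_assoc]

lemma pv_prefix_take {N p : List Char} (h : p <+: N) : p = N.take p.length ∧ p.length ≤ N.length :=
  ⟨(List.prefix_iff_eq_take.mp h), h.length_le⟩

-- A's indexed range loop equals the structural loop pvAS
lemma pv_aloop_eq_aS (name t0 : String) (rest : List String) :
    ∀ (d j : Nat) (w : String), rest.length - j = d → j ≤ rest.length →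
    w.toList = PySem.Chars.join [' '] (((t0 :: rest).take (j+1)).map String.toList) →
    (pvALoop (t0 :: rest) name (PySem.List.pyRange (2 + (j : Int)) (((t0 :: rest).length : Int) + 1) 1) w).toList
      = pvAS name.toList (rest.drop j) w.toList := by
  intro d
  induction d with
  | zero =>
    intro j w hd hj hw
    have hj' : j = rest.length := by omega
    subst hj'
    rw [PySem.List.pyRange_one_eq_nil (by simp; omega)]
    simp [pvALoop, pvAS, List.drop_length]
  | succ d ih =>
    intro j w hd hj hw
    have hjlt : j < rest.length := by omega
    rw [PySem.List.pyRange_one_cons (by simp; omega)]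
    simp only [pvALoop]
    have hslice : PySem.List.slice (t0 :: rest) (some 0) (some (2 + (j : Int))) = (t0 :: rest).take (j + 2) := by
      rw [PySem.List.slice_zero_start,
        show (2 + (j : Int)) = ((j + 2 : Nat) : Int) by push_cast; ring,
        PySem.List.slice_to_natCast]
    have htake : (t0 :: rest).take (j + 2) = (t0 :: rest.take j) ++ [rest[j]] := by
      rw [show j + 2 = (j + 1) + 1 from rfl, List.take_succ_cons, List.take_add_one]
      simp [List.getElem?_eq_getElem hjlt]
    have htest : (PySem.Str.join " " (PySem.List.slice (t0 :: rest) (some 0) (some (2 + (j : Int))))).toList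
        = w.toList ++ ' ' :: rest[j].toList := by
      rw [PySem.Str.toList_join, show (" " : String).toList = [' '] by decide, hslice, htake, List.map_append]
      simp only [List.map_cons, List.map_nil]
      rw [pv_join_snoc [' '] _ _ (by simp)]
      rw [hw]
      have : ((t0 :: rest).take (j + 1)).map String.toList = (t0 :: rest.take j).map String.toList := by
        simp [List.take_succ_cons]
      rw [this]; simp
    have hdrop : rest.drop j = rest[j] :: rest.drop (j + 1) := List.drop_eq_getElem_cons hjlt
    rw [hdrop]
    simp only [pvAS]
    rw [PySem.Str.startswith_eq, htest]
    by_cases hc : PySem.Chars.startswith name.toList (w.toList ++ ' ' :: rest[j].toList) = true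
    · rw [if_pos hc, if_pos hc]
      have harg : (2 : Int) + (j : Int) + 1 = 2 + ((j + 1 : Nat) : Int) := by push_cast; ring
      rw [harg]
      have := ih (j + 1) (PySem.Str.join " " (PySem.List.slice (t0 :: rest) (some 0) (some (2 + (j : Int)))))
        (by omega) (by omega) ?_
      · rw [this, htest]
      · rw [htest]
        have h2 : (t0 :: rest).take (j + 1 + 1) = (t0 :: rest).take (j + 2) := by norm_num
        rw [h2, htake, List.map_append]
        simp only [List.map_cons, List.map_nil]
        rw [pv_join_snoc [' '] _ _ (by simp), hw]
        have : ((t0 :: rest).take (j + 1)).map String.toList = (t0 :: rest.take j).map String.toList := by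
          simp [List.take_succ_cons]
        rw [this]; simp
    · rw [if_neg hc, if_neg hc]

-- core: the structural A-loop from a matched prefix N.take pos is B's position loop
lemma pv_aS_eq_bloop (name : String) : ∀ (ts : List String) (pos : Nat), pos ≤ name.toList.length →
    pvAS name.toList ts (name.toList.take pos) = name.toList.take (pvBLoop name ts pos) := by
  intro ts
  induction ts with
  | nil => intro pos _; simp [pvAS, pvBLoop]
  | cons t r ih =>
    intro pos hpos
    set N := name.toList with hN
    simp only [pvAS, pvBLoop]
    have hsl : PySem.List.slice N (some (pos : Int)) (some ((pos : Int) + ((' ' :: t.toList) : List Char).length)) = (N.drop pos).take (' ' :: t.toList).length := by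
      have : ((pos : Int) + ((' ' :: t.toList) : List Char).length) = ((pos + (' ' :: t.toList).length : Nat) : Int) := by push_cast; ring
      rw [this, PySem.List.slice_natCast]
      congr 1; omega
    have hcond : (PySem.Chars.startswith N (N.take pos ++ ' ' :: t.toList) = true)
        ↔ ((N.drop pos).take (' ' :: t.toList).length = ' ' :: t.toList) := by
      rw [PySem.Chars.startswith_iff]
      constructor
      · intro h
        have h2 : (' ' :: t.toList) <+: N.drop pos :=
          (List.prefix_append_right_inj (N.take pos)).mp
            (by rw [List.take_append_drop]; exact h)
        exact (List.prefix_iff_eq_take.mp h2).symm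
      · intro h
        have h2 : (' ' :: t.toList) <+: N.drop pos := h ▸ List.take_prefix _ _
        calc N.take pos ++ ' ' :: t.toList <+: N.take pos ++ N.drop pos :=
              (List.prefix_append_right_inj (N.take pos)).mpr h2
          _ = N := List.take_append_drop pos N
    by_cases hc : (N.drop pos).take (' ' :: t.toList).length = ' ' :: t.toList
    · rw [if_pos (hcond.mpr hc), if_pos (by rw [hsl]; exact hc)]
      have hpref : N.take pos ++ ' ' :: t.toList <+: N := by
        have h2 : (' ' :: t.toList) <+: N.drop pos := hc ▸ List.take_prefix _ _
        calc N.take pos ++ ' ' :: t.toList <+: N.take pos ++ N.drop pos :=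
              (List.prefix_append_right_inj (N.take pos)).mpr h2
          _ = N := List.take_append_drop pos N
      obtain ⟨heq, hle⟩ := pv_prefix_take hpref
      have hlen : (N.take pos ++ ' ' :: t.toList).length = pos + (' ' :: t.toList).length := by
        simp; omega
      rw [heq, hlen]
      exact ih (pos + (' ' :: t.toList).length) (by rw [← hlen]; exact hpref.length_le)
    · rw [if_neg (fun h => hc (hcond.mp h)), if_neg (by rw [hsl]; exact hc)]

-- ===== VERDICT (by name: the statement is the Claim_ definition above) =====
theorem get_max_common_string_spec : Claim_equal_get_max_common_string := by
  intro tokens name _ hpre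
  unfold Spec_get_max_common_string
  obtain ⟨t0, rest, rfl⟩ : ∃ t0 rest, tokens = t0 :: rest := by
    cases tokens with
    | nil => exact absurd rfl hpre
    | cons a b => exact ⟨a, b, rfl⟩
  have hbase : (PySem.List.pyGet? (t0 :: rest) 0).getD "" = t0 := by
    simp [PySem.List.pyGet?, PySem.List.pyIdx?]
  unfold get_max_common_string get_max_common_string_alt
  simp only [hbase]
  set N := name.toList with hN
  have hlen : PySem.List.len (t0 :: rest) = ((t0 :: rest).length : Int) := by
    simp [PySem.List.len]
  rw [hlen, PySem.List.pyRange_one_cons (by simp)]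
  simp only [pvALoop]
  have hslice1 : PySem.List.slice (t0 :: rest) (some 0) (some 1) = [t0] := by
    rw [PySem.List.slice_zero_start, show (1 : Int) = ((1 : Nat) : Int) by norm_num,
      PySem.List.slice_to_natCast]
    simp
  have htest1 : (PySem.Str.join " " (PySem.List.slice (t0 :: rest) (some 0) (some 1))).toList = t0.toList := by
    rw [PySem.Str.toList_join, hslice1]
    simp [PySem.Chars.join_singleton]
  have hcond1 : PySem.Str.startswith name (PySem.Str.join " " (PySem.List.slice (t0 :: rest) (some 0) (some 1)))
      = PySem.Str.startswith name t0 := by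
    rw [PySem.Str.startswith_eq, PySem.Str.startswith_eq, htest1]
  by_cases hc : PySem.Str.startswith name t0 = true
  · rw [hcond1, if_pos hc, if_neg (by rw [hc]; decide)]
    -- A side: convert the remaining range loop to pvAS
    have harg : (1 : Int) + 1 = 2 + ((0 : Nat) : Int) := by norm_num
    have hA := pv_aloop_eq_aS name t0 rest rest.length 0
      (PySem.Str.join " " (PySem.List.slice (t0 :: rest) (some 0) (some 1)))
      (by omega) (by omega)
      (by rw [htest1]; simp [PySem.Chars.join_singleton])
    rw [harg] at *
    -- B side
    have hpref : t0.toList <+: N := (PySem.Chars.startswith_iff _ _).mp (by rw [← PySem.Str.startswith_eq]; exact hc)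
    obtain ⟨heq0, hle0⟩ := pv_prefix_take hpref
    have hrest : PySem.List.slice (t0 :: rest) (some 1) none = rest := by
      rw [PySem.List.slice_from_one]; rfl
    rw [hrest]
    have hB : (PySem.Str.slice name none (some ((pvBLoop name rest t0.toList.length : Nat) : Int))).toList
        = N.take (pvBLoop name rest t0.toList.length) := by
      rw [PySem.Str.toList_slice, PySem.Chars.slice_eq_listSlice, PySem.List.slice_to_natCast]
    have hcore := pv_aS_eq_bloop name rest t0.toList.length hle0
    rw [← heq0] at hcore
    apply String.toList_injective
    rw [hB, hA, List.drop_zero, htest1, hcore]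
  · have hc' : PySem.Str.startswith name t0 = false := Bool.eq_false_iff.mpr hc
    rw [hcond1, if_neg hc, if_pos (by rw [hc']; decide)]
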